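-- pv_equiv track=rewrite | github.com/baderj/crackmes | Reverse_Keygenme_by_GordonBM/hardcore_keygen.py | ran_values
-- ===== SOURCE A (Python) =====
-- def ran_values(length, values=None, pos=0, val=0):
--     """get all potential random values for length as list """
--
--     if values is None:
--         values = set()
--     if pos == length:
--         values.add(val)
--     else:
--         xor = (2*pos) ^ 6
--         pos += 1
--
--         # case 1: rand is 0
--         next_val = 9*val
--         ran_values(length, values, pos, next_val)
--
--         # case 2: rand is 1
--         next_val = 3*(val*3 + xor)
--         ran_values(length, values, pos, next_val)
--
--     return sorted(values)
-- ===== SOURCE B (Python) =====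
-- def ran_values(length, values=None, pos=0, val=0):
--     """get all potential random values for length as list """
--     if values is None:
--         values = set()
--     cur = {val}
--     for p in range(pos, length):
--         xor = (2 * p) ^ 6
--         cur = {nv for v in cur for nv in (9 * v, 3 * (3 * v + xor))}
--     values.update(cur)
--     return sorted(values)
-- ===== Notes on version B (the rewrite author's own statement) =====
-- stated objective: alternative
-- what changed: Replaces the binary tree recursion (which re-sorts the whole accumulator set at every recursive call) with a single level-by-level loop that maintains one set of reachable partial values per level and sorts once at the end; the reachable set itself still grows ~2^(length-pos), so both remain exponential overall.
import Mathlib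
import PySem

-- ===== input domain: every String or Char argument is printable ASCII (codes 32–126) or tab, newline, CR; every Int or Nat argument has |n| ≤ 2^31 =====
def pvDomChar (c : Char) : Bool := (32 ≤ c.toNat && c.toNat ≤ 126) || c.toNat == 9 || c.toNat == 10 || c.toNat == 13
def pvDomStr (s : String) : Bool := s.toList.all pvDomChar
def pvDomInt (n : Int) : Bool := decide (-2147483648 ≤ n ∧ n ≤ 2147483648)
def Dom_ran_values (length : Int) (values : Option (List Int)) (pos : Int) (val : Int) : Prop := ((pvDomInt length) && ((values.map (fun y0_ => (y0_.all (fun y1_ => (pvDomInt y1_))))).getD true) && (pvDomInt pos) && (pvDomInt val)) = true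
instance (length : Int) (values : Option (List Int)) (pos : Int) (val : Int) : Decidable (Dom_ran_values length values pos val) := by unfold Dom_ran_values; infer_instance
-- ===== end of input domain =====

-- B replaces A's tree recursion (which sorts the whole set at every recursive call) with one
-- level-by-level loop over a set of reachable partial values, sorting once at the end (alternative algorithm).
-- Equivalence is about the RETURN value; both Pythons also add the reached values into a passed-in `values` set.

-- ===== PORT A =====
-- A's recursion: depth decreases as pos walks up to length; under Pre_ (pos ≤ length) the
-- remaining depth is exactly (length - pos).toNat, used here as the structural recursion measure.
def ranA (n : Nat) (pos : Int) (val : Int) (s : PySem.Set Int) : PySem.Set Int :=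
  match n with
  | 0 => PySem.Set.add s val                 -- pos == length: values.add(val)
  | Nat.succ m =>
      let xor := PySem.Int.bxor (2*pos) 6
      let s1 := ranA m (pos+1) (9*val) s      -- case 1: rand is 0
      ranA m (pos+1) (3*(val*3 + xor)) s1     -- case 2: rand is 1

def ran_values (length : Int) (values : Option (List Int)) (pos : Int) (val : Int) : List Int :=
  let s : PySem.Set Int := PySem.Set.ofList (values.getD [])
  PySem.List.sorted (ranA (length - pos).toNat pos val s) (fun x => x) false

-- ===== PORT B =====
-- one level: {nv for v in cur for nv in (9*v, 3*(3*v + xor))}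
def stepB (p : Int) (cur : PySem.Set Int) : PySem.Set Int :=
  cur.foldl (fun acc v =>
      PySem.Set.add (PySem.Set.add acc (9*v)) (3*(3*v + PySem.Int.bxor (2*p) 6)))
    PySem.Set.empty

def ran_values_alt (length : Int) (values : Option (List Int)) (pos : Int) (val : Int) : List Int :=
  let vset : PySem.Set Int := PySem.Set.ofList (values.getD [])
  let cur := (PySem.List.pyRange pos length 1).foldl (fun c p => stepB p c)
               (PySem.Set.ofList [val])
  PySem.List.sorted (PySem.Set.update vset cur) (fun x => x) false

-- ===== PRECONDITION & SPEC =====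
-- Pre_ excludes pos > length, where A recurses past the target forever and raises RecursionError.
def Pre_ran_values (length : Int) (values : Option (List Int)) (pos : Int) (val : Int) : Prop :=
  pos ≤ length
instance (length : Int) (values : Option (List Int)) (pos : Int) (val : Int) : Decidable (Pre_ran_values length values pos val) := by unfold Pre_ran_values; infer_instance

def pvWitness_ran_values : Int × Option (List Int) × Int × Int := (3, some [1, 2], 0, 0)

def Spec_ran_values (length : Int) (values : Option (List Int)) (pos : Int) (val : Int) (out : List Int) : Prop := out = ran_values_alt length values pos val
instance (length : Int) (values : Option (List Int)) (pos : Int) (val : Int) (out : List Int) : Decidable (Spec_ran_values length values pos val out) := by unfold Spec_ran_values; infer_instance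

-- ===== CLAIM (what is proved, stated in full; the proofs are below) =====
def Claim_equal_ran_values : Prop := ∀ (length : Int) (values : Option (List Int)) (pos : Int) (val : Int), Dom_ran_values length values pos val → Pre_ran_values length values pos val → Spec_ran_values length values pos val (ran_values length values pos val)
-- ===== LEMMAS AND PROOFS =====

-- the level loop of B, indexed by the number of remaining levels
def curIter (n : Nat) (p : Int) (c : PySem.Set Int) : PySem.Set Int :=
  match n with
  | 0 => c
  | Nat.succ m => curIter m (p+1) (stepB p c)

theorem curIter_succ (m : Nat) (p : Int) (c : PySem.Set Int) :
    curIter (m+1) p c = curIter m (p+1) (stepB p c) := rfl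

theorem mem_foldl_add2 (c : List Int) (acc : PySem.Set Int) (f g : Int → Int) (x : Int) :
    x ∈ c.foldl (fun acc v => PySem.Set.add (PySem.Set.add acc (f v)) (g v)) acc ↔
      x ∈ acc ∨ ∃ v ∈ c, x = f v ∨ x = g v := by
  induction c generalizing acc with
  | nil => simp
  | cons h t ih =>
    simp only [List.foldl, ih, PySem.Set.mem_add, List.exists_mem_cons_iff]
    generalize (∃ v ∈ t, x = f v ∨ x = g v) = E
    tauto

theorem mem_stepB (p : Int) (c : PySem.Set Int) (x : Int) :
    x ∈ stepB p c ↔ ∃ v ∈ c, x = 9*v ∨ x = 3*(3*v + PySem.Int.bxor (2*p) 6) := by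
  unfold stepB
  rw [mem_foldl_add2]
  simp [PySem.Set.empty]

theorem nodup_ranA (n : Nat) (pos val : Int) (s : PySem.Set Int) (h : s.Nodup) :
    (ranA n pos val s).Nodup := by
  induction n generalizing pos val s with
  | zero => exact PySem.Set.nodup_add _ _ h
  | succ m ih => exact ih _ _ _ (ih _ _ _ h)

theorem mem_stepB_singleton (p v x : Int) :
    x ∈ stepB p [v] ↔ x = 9*v ∨ x = 3*(3*v + PySem.Int.bxor (2*p) 6) := by
  rw [mem_stepB]; simp

theorem mem_curIter_seed (n : Nat) (p : Int) (c : PySem.Set Int) (x : Int) :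
    x ∈ curIter n p c ↔ ∃ v ∈ c, x ∈ curIter n p [v] := by
  induction n generalizing p c with
  | zero => simp [curIter]
  | succ m ih =>
    simp only [curIter_succ]
    constructor
    · intro hmem
      obtain ⟨w, hw, hx⟩ := (ih _ _).mp hmem
      obtain ⟨v, hv, hvw⟩ := (mem_stepB _ _ _).mp hw
      refine ⟨v, hv, (ih _ _).mpr ⟨w, ?_, hx⟩⟩
      exact (mem_stepB _ _ _).mpr ⟨v, List.mem_singleton_self v, hvw⟩
    · rintro ⟨v, hv, hx⟩
      obtain ⟨w, hw, hx2⟩ := (ih _ _).mp hx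
      obtain ⟨u, hu, huw⟩ := (mem_stepB _ _ _).mp hw
      rw [List.mem_singleton] at hu
      subst hu
      exact (ih _ _).mpr ⟨w, (mem_stepB _ _ _).mpr ⟨_, hv, huw⟩, hx2⟩

theorem mem_curIter_succ_singleton (m : Nat) (p v x : Int) :
    x ∈ curIter (m+1) p [v] ↔
      x ∈ curIter m (p+1) [9*v] ∨
        x ∈ curIter m (p+1) [3*(3*v + PySem.Int.bxor (2*p) 6)] := by
  rw [curIter_succ, mem_curIter_seed]
  constructor
  · rintro ⟨w, hw, hx⟩
    rcases (mem_stepB_singleton _ _ _).mp hw with h | h <;> subst h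
    · exact Or.inl hx
    · exact Or.inr hx
  · rintro (hx | hx)
    · exact ⟨_, (mem_stepB_singleton _ _ _).mpr (Or.inl rfl), hx⟩
    · exact ⟨_, (mem_stepB_singleton _ _ _).mpr (Or.inr rfl), hx⟩

theorem mem_ranA (n : Nat) (pos val : Int) (s : PySem.Set Int) (x : Int) :
    x ∈ ranA n pos val s ↔ x ∈ s ∨ x ∈ curIter n pos [val] := by
  induction n generalizing pos val s with
  | zero => simp [ranA, curIter, PySem.Set.mem_add]
  | succ m ih =>
    show x ∈ ranA m (pos+1) _ (ranA m (pos+1) _ s) ↔ _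
    rw [Int.mul_comm val 3, ih, ih]
    conv_rhs => rw [mem_curIter_succ_singleton]
    tauto

theorem foldl_stepB_pyRange (n : Nat) (p : Int) (c : PySem.Set Int) :
    (PySem.List.pyRange p (p + n) 1).foldl (fun c q => stepB q c) c = curIter n p c := by
  induction n generalizing p c with
  | zero =>
    have h : PySem.List.pyRange p (p + (0:Nat)) 1 = [] := by
      rw [PySem.List.pyRange_one]
      simp
    rw [h]; rfl
  | succ m ih =>
    rw [PySem.List.pyRange_one_cons (by push_cast; omega)]
    show (PySem.List.pyRange (p+1) (p + ((m:Int)+1)) 1).foldl _ (stepB p c) = _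
    have harg : p + ((m : Int) + 1) = (p + 1) + m := by ring
    rw [harg, ih]
    rfl

-- ===== VERDICT (by name: the statement is the Claim_ definition above) =====
theorem ran_values_spec : Claim_equal_ran_values := by
  intro length values pos val _ hpre
  unfold Spec_ran_values ran_values ran_values_alt
  have hn : length = pos + ((length - pos).toNat : Int) := by
    unfold Pre_ran_values at hpre; omega
  rw [hn, foldl_stepB_pyRange,
      show ((pos + ((length - pos).toNat : Int) - pos).toNat = (length - pos).toNat) from by omega]
  apply (PySem.List.sorted_id_eq_sorted_id_iff_perm _ _).mpr
  apply (List.perm_ext_iff_of_nodup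
      (nodup_ranA _ _ _ _ (PySem.Set.nodup_ofList _))
      (PySem.Set.nodup_update _ _ (PySem.Set.nodup_ofList _))).mpr
  intro x
  rw [mem_ranA, PySem.Set.mem_update]
  have : PySem.Set.ofList [val] = [val] := rfl
  rw [this]
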